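-- pv_equiv track=rewrite | github.com/AntonButyrin/SBhomeworks | lesson_014/bowling.py | split_result
-- ===== SOURCE A (Python) =====
-- def split_result(results: str):
--     while len(results) > 0:
--         if results[0] == 'X':
--             yield 'X'
--             results = results[1:]
--         else:
--             yield results[:2]
--             results = results[2:]
-- ===== SOURCE B (Python) =====
-- def split_result(results: str):
--     i = 0
--     n = len(results)
--     while i < n:
--         if results[i] == 'X':
--             yield 'X'
--             i += 1
--         else:
--             yield results[i:i + 2]
--             i += 2
-- ===== Notes on version B (the rewrite author's own statement) =====
-- stated objective: faster
-- what changed: B scans the string with an index pointer and constant-size slices instead of repeatedly rebuilding the remaining string with tail slices.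
import Mathlib
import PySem

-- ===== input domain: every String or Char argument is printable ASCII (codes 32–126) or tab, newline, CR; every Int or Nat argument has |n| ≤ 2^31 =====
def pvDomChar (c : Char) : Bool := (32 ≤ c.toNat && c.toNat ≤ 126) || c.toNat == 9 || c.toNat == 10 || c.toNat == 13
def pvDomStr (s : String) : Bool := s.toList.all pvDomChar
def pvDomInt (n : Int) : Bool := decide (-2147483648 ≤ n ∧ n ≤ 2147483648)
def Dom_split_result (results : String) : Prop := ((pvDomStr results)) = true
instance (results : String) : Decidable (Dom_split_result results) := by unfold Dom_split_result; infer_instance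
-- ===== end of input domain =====

-- B replaces A's repeated tail-slicing of the string by an index-pointer scan (objective: faster).

-- ===== PORT A =====
-- A consumes the string: while non-empty, if head is 'X' emit "X" and drop 1,
-- else emit the first-two-chars slice (results[:2] = take 2; exact for nonneg bounds) and drop 2.
def pvGoA : List Char → List String
  | [] => []
  | c :: rest =>
      if c = 'X' then "X" :: pvGoA rest
      else String.ofList (List.take 2 (c :: rest)) :: pvGoA (List.drop 2 (c :: rest))
termination_by l => l.length
decreasing_by all_goals (simp; try omega)

def split_result (results : String) : List String := pvGoA results.toList

-- ===== PORT B =====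
-- B keeps the string fixed and advances an index i; results[i] and results[i:i+2]
-- with 0 ≤ i are exact as l[i]? and (l.drop i).take 2.
def pvGoB (l : List Char) (i : Nat) : List String :=
  if i < l.length then
    if l[i]? = some 'X' then "X" :: pvGoB l (i + 1)
    else String.ofList ((l.drop i).take 2) :: pvGoB l (i + 2)
  else []
termination_by l.length - i
decreasing_by all_goals omega

def split_result_alt (results : String) : List String := pvGoB results.toList 0

-- ===== PRECONDITION & SPEC =====
def Spec_split_result (results : String) (out : List String) : Prop := out = split_result_alt results
instance (results : String) (out : List String) : Decidable (Spec_split_result results out) := by unfold Spec_split_result; infer_instance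

-- ===== CLAIM (what is proved, stated in full; the proofs are below) =====
def Claim_equal_split_result : Prop := ∀ (results : String), Dom_split_result results → Spec_split_result results (split_result results)

-- ===== LEMMAS AND PROOFS =====

theorem pvGoB_eq_goA_drop (l : List Char) (i : Nat) : pvGoB l i = pvGoA (l.drop i) := by
  by_cases h : i < l.length
  case pos =>
    have hget : l[i]? = some l[i] := List.getElem?_eq_getElem h
    have hdrop : l.drop i = l[i] :: l.drop (i + 1) := List.drop_eq_getElem_cons h
    rw [pvGoB, if_pos h, hget, hdrop]
    by_cases hx : l[i] = 'X'
    case pos =>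
      rw [if_pos (by simp [hx]), pvGoA, if_pos hx, pvGoB_eq_goA_drop l (i + 1)]
    case neg =>
      rw [if_neg (by simp [hx]), pvGoA, if_neg hx, pvGoB_eq_goA_drop l (i + 2)]
      simp [List.drop_drop]
  case neg =>
    rw [pvGoB, if_neg h, List.drop_eq_nil_of_le (by omega), pvGoA]
termination_by l.length - i
decreasing_by all_goals omega

-- ===== VERDICT (by name: the statement is the Claim_ definition above) =====
theorem split_result_spec : Claim_equal_split_result := by
  intro results _
  unfold Spec_split_result split_result split_result_alt
  rw [pvGoB_eq_goA_drop]
  simp
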